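-- pv_equiv track=rewrite | github.com/eliottcassidy2000/math | 04-computation/P_hierarchy_general.py | get_ck
-- ===== SOURCE A (Python) =====
-- from math import comb, factorial
--
-- def eulerian_number(n, k):
--     return sum((-1)**j * comb(n+1, j) * (k+1-j)**n for j in range(k+1))
--
-- def get_ck(f, d):
--     """Get c_k^{(f,d)} coefficients for k = 0, ..., d."""
--     result = []
--     for k in range(d + 1):
--         total = 0
--         for j in range(max(0, k - (d - f)), min(f, k) + 1):
--             sign = (-1) ** (d - f - k + j)
--             total += eulerian_number(f + 1, j) * comb(d - f, k - j) * sign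
--         result.append(total)
--     return result
-- ===== SOURCE B (Python) =====
-- from math import comb
--
--
-- def eulerian_number(n, k):
--     return sum((-1)**j * comb(n+1, j) * (k+1-j)**n for j in range(k+1))
--
--
-- def add_poly(p, q):
--     """Coefficient-wise sum of two polynomials, padded to the longer one."""
--     n = max(len(p), len(q))
--     return [(p[i] if i < len(p) else 0) + (q[i] if i < len(q) else 0)
--             for i in range(n)]
--
--
-- def conv(p, q):
--     """Polynomial product (convolution) of coefficient lists p and q."""
--     acc = []
--     for e in reversed(p):
--         acc = add_poly([e * c for c in q], [0] + acc)
--     return acc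
--
--
-- def get_ck(f, d):
--     """Get c_k^{(f,d)} coefficients for k = 0, ..., d."""
--     if f < 0 or d < f:
--         # outside 0 <= f <= d every coefficient is an empty sum
--         return [0] * (d + 1)
--     g = d - f
--     E = [eulerian_number(f + 1, j) for j in range(f + 1)]
--     S = [(-1) ** (g - m) * comb(g, m) for m in range(g + 1)]
--     return conv(E, S)
-- ===== Notes on version B (the rewrite author's own statement) =====
-- stated objective: alternative
-- what changed: B precomputes the Eulerian row E(f+1, .) and the signed binomial row once, then obtains all c_k in one polynomial convolution (iterated shift-and-add), instead of recomputing eulerian_number, comb and the sign inside a nested per-k loop.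
import Mathlib
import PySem

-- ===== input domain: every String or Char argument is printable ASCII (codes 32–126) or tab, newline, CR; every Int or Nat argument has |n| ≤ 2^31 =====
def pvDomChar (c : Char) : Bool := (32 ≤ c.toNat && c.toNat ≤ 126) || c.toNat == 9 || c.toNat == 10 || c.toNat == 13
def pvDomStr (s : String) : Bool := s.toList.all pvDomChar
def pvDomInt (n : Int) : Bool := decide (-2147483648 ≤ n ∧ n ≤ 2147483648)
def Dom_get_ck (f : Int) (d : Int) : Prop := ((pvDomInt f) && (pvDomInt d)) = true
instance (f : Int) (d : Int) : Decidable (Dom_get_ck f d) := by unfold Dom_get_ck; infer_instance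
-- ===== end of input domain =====

-- B precomputes the Eulerian row and the signed binomial row once and combines them in one
-- polynomial convolution, instead of recomputing eulerian_number/comb/sign per output entry
-- (objective: alternative algorithm, same return value).

-- ===== PORT A =====
-- math.comb: exact for nonnegative arguments, the only arguments any call site of
-- either program evaluates it at (both loops are empty whenever an argument would be negative).
def pyComb (n k : Int) : Int := (Nat.choose n.toNat k.toNat : Int)

-- `sum((-1)**j * comb(n+1, j) * (k+1-j)**n for j in range(k+1))`; the `**` exponents
-- are nonnegative at every evaluated call site, so `^ ·.toNat` is exact there.
def eulerian_number (n k : Int) : Int :=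
  (((PySem.List.pyRange 0 (k + 1) 1).map
      (fun j => (-1 : Int) ^ j.toNat * pyComb (n + 1) j * (k + 1 - j) ^ n.toNat)).sum)

def get_ck (f : Int) (d : Int) : List Int :=
  (PySem.List.pyRange 0 (d + 1) 1).foldl
    (fun result k =>
      result ++
        [(PySem.List.pyRange (max 0 (k - (d - f))) (min f k + 1) 1).foldl
            (fun total j =>
              total +
                eulerian_number (f + 1) j * pyComb (d - f) (k - j) *
                  (-1 : Int) ^ (d - f - k + j).toNat)
            0])
    []

-- ===== PORT B =====
def add_poly (p q : List Int) : List Int :=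
  (List.range (max p.length q.length)).map (fun i => p.getD i 0 + q.getD i 0)

def conv (p q : List Int) : List Int :=
  p.reverse.foldl (fun acc e => add_poly (q.map (fun c => e * c)) (0 :: acc)) []

def get_ck_alt (f : Int) (d : Int) : List Int :=
  if f < 0 ∨ d < f then List.replicate (d + 1).toNat 0
  else
    conv
      ((PySem.List.pyRange 0 (f + 1) 1).map (fun j => eulerian_number (f + 1) j))
      ((PySem.List.pyRange 0 (d - f + 1) 1).map
        (fun m => (-1 : Int) ^ (d - f - m).toNat * pyComb (d - f) m))

-- ===== PRECONDITION & SPEC =====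
def Spec_get_ck (f : Int) (d : Int) (out : List Int) : Prop := out = get_ck_alt f d
instance (f : Int) (d : Int) (out : List Int) : Decidable (Spec_get_ck f d out) := by unfold Spec_get_ck; infer_instance

-- ===== CLAIM (what is proved, stated in full; the proofs are below) =====
def Claim_equal_get_ck : Prop := ∀ (f : Int) (d : Int), Dom_get_ck f d → Spec_get_ck f d (get_ck f d)

-- ===== LEMMAS AND PROOFS =====

-- out-of-range-safe Int-indexed lookup, used only to state the convolution invariant
def sget (q : List Int) (i : Int) : Int := if 0 ≤ i then q.getD i.toNat 0 else 0

theorem add_poly_length (p q : List Int) : (add_poly p q).length = max p.length q.length := by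
  simp [add_poly]

theorem add_poly_getD (p q : List Int) (i : Nat) :
    (add_poly p q).getD i 0 = p.getD i 0 + q.getD i 0 := by
  by_cases h : i < max p.length q.length
  · rw [List.getD_eq_getElem _ _ (by simpa [add_poly] using h)]
    simp [add_poly]
  · have h1 : p.getD i 0 = 0 := List.getD_eq_default _ _ (by omega)
    have h2 : q.getD i 0 = 0 := List.getD_eq_default _ _ (by omega)
    have h3 : (add_poly p q).getD i 0 = 0 := List.getD_eq_default _ _ (by simp [add_poly]; omega)
    rw [h1, h2, h3]; ring

theorem conv_eq_foldr (p q : List Int) :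
    conv p q = p.foldr (fun e acc => add_poly (q.map (fun c => e * c)) (0 :: acc)) [] := by
  rw [conv, List.foldl_reverse]

theorem conv_length (p q : List Int) (hq : q ≠ []) (hp : p ≠ []) :
    (conv p q).length = p.length + q.length - 1 := by
  induction p with
  | nil => simp at hp
  | cons a p ih =>
    rw [conv_eq_foldr] at *
    have hq1 : 1 ≤ q.length := List.length_pos_iff.mpr hq
    rcases List.eq_nil_or_concat p with h | _
    · subst h; simp [add_poly_length]; omega
    · have hpne : p ≠ [] := by rintro rfl; simp_all
      have := ih hpne
      simp only [List.foldr_cons, add_poly_length, List.length_map, List.length_cons]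
      rw [this]
      simp; omega

theorem conv_getD (p q : List Int) (k : Nat) :
    (conv p q).getD k 0 =
      ((List.range p.length).map (fun j => p.getD j 0 * sget q ((k : Int) - (j : Int)))).sum := by
  rw [conv_eq_foldr]
  induction p generalizing k with
  | nil => simp
  | cons a p ih =>
    simp only [List.foldr_cons, add_poly_getD, List.length_cons]
    rw [List.range_succ_eq_map]
    simp only [List.map_cons, List.map_map, List.sum_cons]
    have hmap : (q.map (fun c => a * c)).getD k 0 = a * q.getD k 0 := by
      by_cases h : k < q.length
      · rw [List.getD_eq_getElem _ _ (by simpa using h), List.getD_eq_getElem _ _ h]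
        simp
      · rw [List.getD_eq_default _ _ (by simp; omega), List.getD_eq_default _ _ (by omega)]
        ring
    rw [hmap]
    have head : (a :: p).getD 0 0 * sget q ((k : Int) - ((0:Nat) : Int)) = a * q.getD k 0 := by
      simp [sget]
    rw [head]
    cases k with
    | zero =>
      have tailz : ((List.range p.length).map
          ((fun j => (a :: p).getD j 0 * sget q (((0:Nat) : Int) - (j : Int))) ∘ (fun n => n + 1))).sum = 0 := by
        apply List.sum_eq_zero
        intro x hx
        simp only [List.mem_map] at hx
        obtain ⟨j, hj, rfl⟩ := hx
        have hz : sget q (((0:Nat) : Int) - (((j+1) : Nat) : Int)) = 0 := by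
          rw [sget, if_neg (by push_cast; omega)]
        simp only [Function.comp_apply, hz, mul_zero]
      rw [tailz]
      have hcz : ((0:Int) :: List.foldr (fun e acc => add_poly (q.map (fun c => e * c)) (0 :: acc)) [] p).getD 0 0 = 0 := rfl
      rw [hcz]
    | succ s =>
      have hcz : ((0:Int) :: List.foldr (fun e acc => add_poly (q.map (fun c => e * c)) (0 :: acc)) [] p).getD (s+1) 0
          = (List.foldr (fun e acc => add_poly (q.map (fun c => e * c)) (0 :: acc)) [] p).getD s 0 := rfl
      rw [hcz, ih s]
      have tl : ((List.range p.length).map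
          ((fun j => (a :: p).getD j 0 * sget q ((((s+1) : Nat) : Int) - (j : Int))) ∘ (fun n => n + 1)))
          = ((List.range p.length).map (fun j => p.getD j 0 * sget q (((s : Nat) : Int) - (j : Int)))) := by
        apply List.map_congr_left
        intro j hj
        have harg : ((((s+1) : Nat) : Int) - (((j+1) : Nat) : Int)) = (((s : Nat) : Int) - (j : Int)) := by
          push_cast; ring
        simp only [Function.comp_apply, List.getD_cons_succ, harg]
      rw [tl]

-- A's loop, reshaped as a map of sums (same values, same ranges)
theorem getck_eq_map (f d : Int) :
    get_ck f d = (PySem.List.pyRange 0 (d + 1) 1).map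
      (fun k => ((PySem.List.pyRange (max 0 (k - (d - f))) (min f k + 1) 1).map
          (fun j => eulerian_number (f + 1) j * pyComb (d - f) (k - j) *
            (-1 : Int) ^ (d - f - k + j).toNat)).sum) := by
  rw [get_ck, PySem.List.foldl_append_singleton_eq_map]
  rw [List.nil_append]
  apply List.map_congr_left
  intro k hk
  rw [PySem.List.foldl_add]
  rw [zero_add]

-- the two precomputed rows of B, named for the proofs
def Erow (f : Int) : List Int :=
  (PySem.List.pyRange 0 (f + 1) 1).map (fun j => eulerian_number (f + 1) j)

def Srow (f d : Int) : List Int :=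
  (PySem.List.pyRange 0 (d - f + 1) 1).map
    (fun m => (-1 : Int) ^ (d - f - m).toNat * pyComb (d - f) m)

theorem alt_pos (f d : Int) (h : ¬(f < 0 ∨ d < f)) :
    get_ck_alt f d = conv (Erow f) (Srow f d) := by
  rw [get_ck_alt, if_neg h]; rfl

theorem Erow_length (f : Int) : (Erow f).length = (f + 1).toNat := by
  simp [Erow, PySem.List.length_pyRange_one]

theorem Srow_length (f d : Int) : (Srow f d).length = (d - f + 1).toNat := by
  simp [Srow, PySem.List.length_pyRange_one]

theorem Erow_getD (f : Int) (j : Int) (h0 : 0 ≤ j) (h1 : j ≤ f) :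
    (Erow f).getD j.toNat 0 = eulerian_number (f + 1) j := by
  have hlen : j.toNat < (Erow f).length := by rw [Erow_length]; omega
  rw [List.getD_eq_getElem _ _ hlen]
  simp only [Erow, List.getElem_map, PySem.List.getElem_pyRange_one]
  have : (0 : Int) + (j.toNat : Int) = j := by omega
  rw [this]

theorem Srow_sget (f d : Int) (i : Int) (hg : 0 ≤ d - f) (h0 : 0 ≤ i) (h1 : i ≤ d - f) :
    sget (Srow f d) i = (-1 : Int) ^ (d - f - i).toNat * pyComb (d - f) i := by
  rw [sget, if_pos h0]
  have hlen : i.toNat < (Srow f d).length := by rw [Srow_length]; omega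
  rw [List.getD_eq_getElem _ _ hlen]
  simp only [Srow, List.getElem_map, PySem.List.getElem_pyRange_one]
  have : (0 : Int) + (i.toNat : Int) = i := by omega
  rw [this]

theorem Srow_sget_high (f d : Int) (i : Int) (hg : 0 ≤ d - f) (h1 : d - f < i) :
    sget (Srow f d) i = 0 := by
  rw [sget, if_pos (by omega)]
  exact List.getD_eq_default _ _ (by rw [Srow_length]; omega)

theorem sget_neg (q : List Int) (i : Int) (h : i < 0) : sget q i = 0 := by
  rw [sget, if_neg (by omega)]

theorem getck_degenerate (f d : Int) (h : f < 0 ∨ d < f) :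
    get_ck f d = List.replicate (d + 1).toNat 0 := by
  rw [getck_eq_map]
  have hz : ∀ k ∈ PySem.List.pyRange 0 (d + 1) 1,
      ((PySem.List.pyRange (max 0 (k - (d - f))) (min f k + 1) 1).map
          (fun j => eulerian_number (f + 1) j * pyComb (d - f) (k - j) *
            (-1 : Int) ^ (d - f - k + j).toNat)).sum = (fun _ : Int => (0 : Int)) k := by
    intro k hk
    rw [PySem.List.mem_pyRange_one] at hk
    rw [PySem.List.pyRange_one_eq_nil (by omega)]
    simp
  rw [List.map_congr_left hz, List.map_const', PySem.List.length_pyRange_one]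
  norm_num

theorem inner_eq (f d : Int) (hf : 0 ≤ f) (hfd : f ≤ d) (k : Int) (hk0 : 0 ≤ k) (hkd : k ≤ d) :
    ((PySem.List.pyRange (max 0 (k - (d - f))) (min f k + 1) 1).map
        (fun j => eulerian_number (f + 1) j * pyComb (d - f) (k - j) *
          (-1 : Int) ^ (d - f - k + j).toNat)).sum
      = ((List.range (Erow f).length).map
          (fun j => (Erow f).getD j 0 * sget (Srow f d) (k - (j : Int)))).sum := by
  have hg : 0 ≤ d - f := by omega
  -- step 1: rewrite the Nat-range sum as a sum over pyRange 0 (f+1)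
  have step1 : ((List.range (Erow f).length).map
      (fun j => (Erow f).getD j 0 * sget (Srow f d) (k - (j : Int)))).sum
      = ((PySem.List.pyRange 0 (f + 1) 1).map
          (fun j => (Erow f).getD j.toNat 0 * sget (Srow f d) (k - j))).sum := by
    rw [PySem.List.pyRange_one, List.map_map, Erow_length]
    have hn : (f + 1 - 0).toNat = (f + 1).toNat := by norm_num
    rw [hn]
    apply congrArg
    apply List.map_congr_left
    intro t ht
    simp only [Function.comp_apply, zero_add, Int.toNat_natCast]
  rw [step1]
  -- step 2: split pyRange 0 (f+1) at lo and hi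
  have hlo1 : (0 : Int) ≤ max 0 (k - (d - f)) := by omega
  have hlo2 : max 0 (k - (d - f)) ≤ min f k + 1 := by omega
  have hhi : min f k + 1 ≤ f + 1 := by omega
  rw [PySem.List.pyRange_one_append 0 (max 0 (k - (d - f))) (f + 1) hlo1 (by omega),
      PySem.List.pyRange_one_append (max 0 (k - (d - f))) (min f k + 1) (f + 1) hlo2 hhi]
  rw [List.map_append, List.map_append, List.sum_append, List.sum_append]
  -- the low piece vanishes
  have hlowz : ((PySem.List.pyRange 0 (max 0 (k - (d - f))) 1).map
      (fun j => (Erow f).getD j.toNat 0 * sget (Srow f d) (k - j))).sum = 0 := by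
    apply List.sum_eq_zero
    intro x hx
    simp only [List.mem_map] at hx
    obtain ⟨j, hj, rfl⟩ := hx
    rw [PySem.List.mem_pyRange_one] at hj
    rw [Srow_sget_high f d (k - j) hg (by omega), mul_zero]
  -- the high piece vanishes
  have hhighz : ((PySem.List.pyRange (min f k + 1) (f + 1) 1).map
      (fun j => (Erow f).getD j.toNat 0 * sget (Srow f d) (k - j))).sum = 0 := by
    apply List.sum_eq_zero
    intro x hx
    simp only [List.mem_map] at hx
    obtain ⟨j, hj, rfl⟩ := hx
    rw [PySem.List.mem_pyRange_one] at hj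
    rw [sget_neg _ _ (by omega), mul_zero]
  rw [hlowz, hhighz, zero_add, add_zero]
  -- step 3: on the middle range the summands agree termwise
  apply congrArg
  apply List.map_congr_left
  intro j hj
  rw [PySem.List.mem_pyRange_one] at hj
  have hj0 : 0 ≤ j := by omega
  have hjf : j ≤ f := by omega
  have hjk : j ≤ k := by omega
  have hkj : k - j ≤ d - f := by omega
  rw [Erow_getD f j hj0 hjf, Srow_sget f d (k - j) hg (by omega) hkj]
  have hexp : d - f - (k - j) = d - f - k + j := by ring
  rw [hexp]
  ring

-- ===== VERDICT (by name: the statement is the Claim_ definition above) =====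
theorem get_ck_spec : Claim_equal_get_ck := by
  intro f d _
  show get_ck f d = get_ck_alt f d
  by_cases h : f < 0 ∨ d < f
  · rw [get_ck_alt, if_pos h, getck_degenerate f d h]
  · rw [alt_pos f d h, getck_eq_map]
    have hf : 0 ≤ f := by omega
    have hfd : f ≤ d := by omega
    have hE : Erow f ≠ [] := by
      apply List.ne_nil_of_length_pos; rw [Erow_length]; omega
    have hS : Srow f d ≠ [] := by
      apply List.ne_nil_of_length_pos; rw [Srow_length]; omega
    have hclen : (conv (Erow f) (Srow f d)).length = (d + 1).toNat := by
      rw [conv_length _ _ hS hE, Erow_length, Srow_length]; omega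
    apply List.ext_getElem
    · rw [List.length_map, PySem.List.length_pyRange_one, hclen]
      omega
    · intro n h1 h2
      have hnd : (n : Int) ≤ d := by
        rw [List.length_map, PySem.List.length_pyRange_one] at h1
        omega
      rw [List.getElem_map, PySem.List.getElem_pyRange_one]
      rw [← List.getD_eq_getElem (conv (Erow f) (Srow f d)) 0 h2, conv_getD]
      have h0n : (0 : Int) + (n : Int) = (n : Int) := by omega
      rw [h0n]
      exact inner_eq f d hf hfd (n : Int) (by omega) hnd
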